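-- pv_equiv track=rewrite | github.com/Y-Kuro-u/zisui_maker | src/contrast.py | is_down_contrast
-- ===== SOURCE A (Python) =====
-- def is_down_contrast(img_hist):
--     """
--     コントラストをこれ以上上げるかを判定する
--     判定基準は以下：
--         [0 ~ 100]の合計値が全体の中で半数以上を占めている場合はこれ以上下げない(Falseを返す)
--             - 全体的に暗めの書籍は暗めの色で濃淡を付けていることが多いので少し広い幅で判断する
--         それ以外の場合は更にコントラストを下げる(Trueを返す)
--
--     input:
--         img_hist: 画像のヒストグラムを表した配列
--     """
--
--     hist = [x[0] for x in img_hist]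
--     hist = [sum(hist[:101])] + hist[101:]
--     index = max(enumerate(hist), key = lambda x:x[1])[0]
--
--     if index == 0:
--         return False
--     else:
--         return True
-- ===== SOURCE B (Python) =====
-- def is_down_contrast(img_hist):
--     total = sum(x[0] for x in img_hist[:101])
--     return any(x[0] > total for x in img_hist[101:])
-- ===== Notes on version B (the rewrite author's own statement) =====
-- stated objective: simpler
-- what changed: B skips building the collapsed histogram and the enumerate/argmax scan: it sums the first 101 bin counts once and short-circuits on any tail bin strictly exceeding that sum, which coincides with A's argmax-at-index-0 test because max() keeps the first maximal element on ties.
import Mathlib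
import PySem

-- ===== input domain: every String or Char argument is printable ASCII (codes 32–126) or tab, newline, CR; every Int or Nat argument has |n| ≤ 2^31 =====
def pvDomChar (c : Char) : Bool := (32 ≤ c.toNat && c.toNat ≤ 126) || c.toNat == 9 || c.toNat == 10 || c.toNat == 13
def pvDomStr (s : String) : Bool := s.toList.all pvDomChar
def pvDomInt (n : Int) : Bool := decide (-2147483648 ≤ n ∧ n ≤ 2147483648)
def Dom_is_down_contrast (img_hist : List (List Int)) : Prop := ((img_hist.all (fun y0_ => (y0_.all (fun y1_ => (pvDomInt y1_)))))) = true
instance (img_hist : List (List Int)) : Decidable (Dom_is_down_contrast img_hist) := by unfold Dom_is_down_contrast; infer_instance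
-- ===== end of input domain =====

-- B replaces A's collapsed-list construction and enumerate/argmax scan by a head-sum plus a strict
-- threshold test over the tail bins (simpler; same asymptotic cost).

-- ===== PORT A =====
def is_down_contrast (img_hist : List (List Int)) : Bool :=
  -- hist = [x[0] for x in img_hist]   (x[0] raises on an empty inner list; excluded by Pre_)
  let hist := img_hist.map (fun x => (PySem.List.pyGet? x 0).getD 0)
  -- hist = [sum(hist[:101])] + hist[101:]
  let hist2 := (PySem.List.slice hist none (some 101)).sum :: PySem.List.slice hist (some 101) none
  -- index = max(enumerate(hist), key = lambda x: x[1])[0]   (hist2 is nonempty, so max? is some)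
  let index := ((PySem.List.max? (PySem.List.enumerate hist2 0) (fun x => x.2)).getD (0, 0)).1
  if index = 0 then false else true

-- ===== PORT B =====
def is_down_contrast_alt (img_hist : List (List Int)) : Bool :=
  -- total = sum(x[0] for x in img_hist[:101])
  let total := ((PySem.List.slice img_hist none (some 101)).map
      (fun x => (PySem.List.pyGet? x 0).getD 0)).sum
  -- any(x[0] > total for x in img_hist[101:])
  (PySem.List.slice img_hist (some 101) none).any
    (fun x => total < (PySem.List.pyGet? x 0).getD 0)

-- ===== PRECONDITION & SPEC =====
-- Pre_ excludes exactly the inputs where Python A raises IndexError: a histogram row with no entries.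
def Pre_is_down_contrast (img_hist : List (List Int)) : Prop :=
  ∀ x ∈ img_hist, x ≠ []
instance (img_hist : List (List Int)) : Decidable (Pre_is_down_contrast img_hist) := by
  unfold Pre_is_down_contrast; infer_instance

def pvWitness_is_down_contrast : List (List Int) := [[5], [3], [7]]

def Spec_is_down_contrast (img_hist : List (List Int)) (out : Bool) : Prop := out = is_down_contrast_alt img_hist
instance (img_hist : List (List Int)) (out : Bool) : Decidable (Spec_is_down_contrast img_hist out) := by unfold Spec_is_down_contrast; infer_instance

-- ===== CLAIM (what is proved, stated in full; the proofs are below) =====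
def Claim_equal_is_down_contrast : Prop := ∀ (img_hist : List (List Int)), Dom_is_down_contrast img_hist → Pre_is_down_contrast img_hist → Spec_is_down_contrast img_hist (is_down_contrast img_hist)

-- ===== LEMMAS AND PROOFS =====

-- the step of A's argmax fold (max with key = second component, first maximal kept)
def pvStep (acc : Option (Int × Int)) (x : Int × Int) : Option (Int × Int) :=
  match acc with
  | none => some x
  | some m => if m.2 < x.2 then some x else some m

lemma max?_eq_foldl_pvStep (xs : List (Int × Int)) :
    PySem.List.max? xs (fun x => x.2) = xs.foldl pvStep none := by
  unfold PySem.List.max?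
  congr 1
  funext acc x
  cases acc <;> rfl

-- A's argmax loop, started at an entry with index a ≥ 0 and value b, over the enumerated tail
-- (indices ≥ 1): it ends at index 0 iff it started there and no tail entry strictly exceeds b.
lemma maxloop_fst_zero (t : List Int) : ∀ (i a b : Int), 1 ≤ i →
    ((((PySem.List.enumerate t i).foldl pvStep (some (a, b))).getD (0, 0)).1 = 0
      ↔ (a = 0 ∧ ∀ y ∈ t, ¬ b < y)) := by
  induction t with
  | nil => intro i a b _; simp [PySem.List.enumerate]
  | cons y t' ih =>
    intro i a b hi
    rw [PySem.List.enumerate_cons]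
    simp only [List.foldl_cons, pvStep]
    by_cases h : b < y
    · rw [if_pos h]
      rw [ih (i + 1) i y (by omega)]
      constructor
      · rintro ⟨hi0, _⟩; omega
      · rintro ⟨_, hall⟩; exact absurd h (hall y (by simp))
    · rw [if_neg h]
      rw [ih (i + 1) a b (by omega)]
      constructor
      · rintro ⟨ha, hall⟩
        exact ⟨ha, by intro z hz; rcases List.mem_cons.mp hz with rfl | hz'; exact h; exact hall z hz'⟩
      · rintro ⟨ha, hall⟩
        exact ⟨ha, fun z hz => hall z (List.mem_cons_of_mem _ hz)⟩

-- ===== VERDICT (by name: the statement is the Claim_ definition above) =====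
theorem is_down_contrast_spec : Claim_equal_is_down_contrast := by
  intro img_hist _ _
  unfold Spec_is_down_contrast is_down_contrast is_down_contrast_alt
  simp only []
  set f : List Int → Int := fun x => (PySem.List.pyGet? x 0).getD 0 with hf
  have hslice_to : ∀ (l : List (List Int)), PySem.List.slice l none (some 101) = l.take 101 := by
    intro l; exact PySem.List.slice_to l (by norm_num)
  have hslice_to' : ∀ (l : List Int), PySem.List.slice l none (some 101) = l.take 101 := by
    intro l; exact PySem.List.slice_to l (by norm_num)
  have hslice_fr : ∀ (l : List (List Int)), PySem.List.slice l (some 101) none = l.drop 101 := by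
    intro l; exact PySem.List.slice_from l (by norm_num)
  have hslice_fr' : ∀ (l : List Int), PySem.List.slice l (some 101) none = l.drop 101 := by
    intro l; exact PySem.List.slice_from l (by norm_num)
  rw [hslice_to', hslice_fr', hslice_to, hslice_fr]
  rw [← List.map_take, ← List.map_drop]
  set s : Int := ((img_hist.take 101).map f).sum
  set t : List Int := (img_hist.drop 101).map f
  rw [PySem.List.enumerate_cons, max?_eq_foldl_pvStep]
  simp only [zero_add, List.foldl_cons]
  have hstep : pvStep none (0, s) = some (0, s) := rfl
  rw [hstep]
  have h := maxloop_fst_zero t 1 0 s (le_refl 1)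
  split_ifs with hz
  · obtain ⟨_, hall⟩ := h.mp hz
    symm
    simp only [List.any_eq_false]
    intro y hy
    simpa using hall (f y) (List.mem_map_of_mem hy)
  · have hnc : ∃ y ∈ t, s < y := by
      by_contra hc
      push Not at hc
      exact hz (h.mpr ⟨rfl, fun y hy => not_lt.mpr (hc y hy)⟩)
    obtain ⟨y, hy, hlt⟩ := hnc
    symm
    rw [List.any_eq_true]
    obtain ⟨x, hx, rfl⟩ := List.mem_map.mp hy
    exact ⟨x, hx, by simpa using hlt⟩
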